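-- pv_equiv track=rewrite | github.com/aThoughtfulSoul/rive-navigator | agent/tools/task_manager.py | _inject_imported_asset_fit_step
-- ===== SOURCE A (Python) =====
-- IMPORTED_ASSET_TERMS = ("svg", "import", "imported", "paste", "pasted", "asset")
--
-- FIT_CENTER_TERMS = ("scale down", "resize", "fit inside", "fit within", "center", "centre")
--
-- ANIMATION_STEP_TERMS = (
--     "animate",
--     "animation",
--     "keyframe",
--     "playhead",
--     "timeline",
--     "bounce",
--     "move",
--     "position",
--     "rotation",
--     "opacity",
-- )
--
-- IMPORTED_ASSET_FIT_STEP = (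
--     "Scale the imported SVG down so it fits fully inside the artboard, center it, and press F so the full artboard and asset are clearly framed before animating. After switching to Animate mode, press F again if the workspace changed the visible canvas area."
-- )
--
-- def _inject_imported_asset_fit_step(task_name: str, steps: list[str]) -> list[str]:
--     if not steps:
--         return steps
--
--     combined = " ".join([task_name, *steps]).lower()
--     if not any(term in combined for term in IMPORTED_ASSET_TERMS):
--         return steps
--
--     if any(any(term in step.lower() for term in FIT_CENTER_TERMS) for step in steps):
--         return steps
--
--     insert_index = None
--     for index, step in enumerate(steps):
--         lowered = step.lower()
--         if any(term in lowered for term in IMPORTED_ASSET_TERMS):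
--             insert_index = index + 1
--             break
--
--     if insert_index is None:
--         for index, step in enumerate(steps):
--             lowered = step.lower()
--             if any(term in lowered for term in ANIMATION_STEP_TERMS):
--                 insert_index = index
--                 break
--
--     if insert_index is None:
--         insert_index = 0
--
--     return steps[:insert_index] + [IMPORTED_ASSET_FIT_STEP] + steps[insert_index:]
-- ===== SOURCE B (Python) =====
-- IMPORTED_ASSET_TERMS = ("svg", "import", "imported", "paste", "pasted", "asset")
--
-- FIT_CENTER_TERMS = ("scale down", "resize", "fit inside", "fit within", "center", "centre")
--
-- ANIMATION_STEP_TERMS = (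
--     "animate",
--     "animation",
--     "keyframe",
--     "playhead",
--     "timeline",
--     "bounce",
--     "move",
--     "position",
--     "rotation",
--     "opacity",
-- )
--
-- IMPORTED_ASSET_FIT_STEP = (
--     "Scale the imported SVG down so it fits fully inside the artboard, center it, and press F so the full artboard and asset are clearly framed before animating. After switching to Animate mode, press F again if the workspace changed the visible canvas area."
-- )
--
-- def _inject_imported_asset_fit_step(task_name: str, steps: list[str]) -> list[str]:
--     if not steps:
--         return steps
--
--     combined = " ".join([task_name, *steps]).lower()
--     if not any(term in combined for term in IMPORTED_ASSET_TERMS):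
--         return steps
--
--     # one pass: fit-center early return, plus both candidate indices recorded once
--     asset_idx = None
--     anim_idx = None
--     for i, step in enumerate(steps):
--         low = step.lower()
--         if any(term in low for term in FIT_CENTER_TERMS):
--             return steps
--         if asset_idx is None and any(term in low for term in IMPORTED_ASSET_TERMS):
--             asset_idx = i + 1
--         if anim_idx is None and any(term in low for term in ANIMATION_STEP_TERMS):
--             anim_idx = i
--
--     k = asset_idx if asset_idx is not None else (anim_idx if anim_idx is not None else 0)
--     out = list(steps)
--     out.insert(k, IMPORTED_ASSET_FIT_STEP)
--     return out
-- ===== Notes on version B (the rewrite author's own statement) =====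
-- stated objective: alternative
-- what changed: B replaces A's three sequential scans over steps (the fit-center any-check, the asset-index scan, and the fallback animation-index scan) with a single pass that returns early on a fit-center term and records each of the two candidate indices at most once, then inserts via list.insert.
import Mathlib
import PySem

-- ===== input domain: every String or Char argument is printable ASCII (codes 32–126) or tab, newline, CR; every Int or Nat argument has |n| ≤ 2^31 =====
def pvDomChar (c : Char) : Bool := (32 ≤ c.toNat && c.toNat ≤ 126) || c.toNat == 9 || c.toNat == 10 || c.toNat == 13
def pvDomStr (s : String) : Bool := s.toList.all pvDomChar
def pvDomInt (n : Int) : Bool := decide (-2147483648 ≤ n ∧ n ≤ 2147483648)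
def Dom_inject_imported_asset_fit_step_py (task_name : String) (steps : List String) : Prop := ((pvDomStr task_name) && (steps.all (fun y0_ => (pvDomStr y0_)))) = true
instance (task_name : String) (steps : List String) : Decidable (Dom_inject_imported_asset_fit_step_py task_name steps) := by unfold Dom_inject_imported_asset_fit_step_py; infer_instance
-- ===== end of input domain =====

-- B replaces A's three sequential scans (fit-center check, asset scan, animation scan) by one
-- pass recording both candidate indices; objective: alternative decomposition (same asymptotics).

def pvAssetTerms : List String := ["svg", "import", "imported", "paste", "pasted", "asset"]
def pvFitTerms : List String := ["scale down", "resize", "fit inside", "fit within", "center", "centre"]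
def pvAnimTerms : List String :=
  ["animate", "animation", "keyframe", "playhead", "timeline", "bounce", "move", "position", "rotation", "opacity"]
def pvFitStep : String :=
  "Scale the imported SVG down so it fits fully inside the artboard, center it, and press F so the full artboard and asset are clearly framed before animating. After switching to Animate mode, press F again if the workspace changed the visible canvas area."

-- any(term in low for term in terms)
def pvAnyTerm (terms : List String) (low : String) : Bool := terms.any (fun t => PySem.Str.isIn t low)

-- ===== PORT A =====
-- A's first loop: first index i whose lowered step contains an asset term, recorded as i+1
def pvScanAsset : Nat → List String → Option Nat
  | _, [] => none
  | i, s :: rest =>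
    if pvAnyTerm pvAssetTerms (PySem.Str.lower s) then some (i + 1) else pvScanAsset (i + 1) rest

-- A's second loop: first index i whose lowered step contains an animation term
def pvScanAnim : Nat → List String → Option Nat
  | _, [] => none
  | i, s :: rest =>
    if pvAnyTerm pvAnimTerms (PySem.Str.lower s) then some i else pvScanAnim (i + 1) rest

def inject_imported_asset_fit_step_py (task_name : String) (steps : List String) : List String :=
  if steps = [] then steps
  else
    let combined := PySem.Str.lower (PySem.Str.join " " (task_name :: steps))
    if !(pvAssetTerms.any (fun t => PySem.Str.isIn t combined)) then steps
    else if steps.any (fun s => pvAnyTerm pvFitTerms (PySem.Str.lower s)) then steps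
    else
      let k : Nat :=
        match pvScanAsset 0 steps with
        | some k => k
        | none =>
          match pvScanAnim 0 steps with
          | some k => k
          | none => 0
      steps.take k ++ [pvFitStep] ++ steps.drop k

-- ===== PORT B =====
-- B's single pass: none = early return (fit-center term), else the two optional indices
def pvAltLoop : Nat → List String → Option Nat → Option Nat → Option (Option Nat × Option Nat)
  | _, [], aIdx, nIdx => some (aIdx, nIdx)
  | i, s :: rest, aIdx, nIdx =>
    let low := PySem.Str.lower s
    if pvAnyTerm pvFitTerms low then none
    else
      pvAltLoop (i + 1) rest
        (if aIdx.isNone && pvAnyTerm pvAssetTerms low then some (i + 1) else aIdx)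
        (if nIdx.isNone && pvAnyTerm pvAnimTerms low then some i else nIdx)

def inject_imported_asset_fit_step_py_alt (task_name : String) (steps : List String) : List String :=
  if steps = [] then steps
  else
    let combined := PySem.Str.lower (PySem.Str.join " " (task_name :: steps))
    if !(pvAssetTerms.any (fun t => PySem.Str.isIn t combined)) then steps
    else
      match pvAltLoop 0 steps none none with
      | none => steps
      | some (aIdx, nIdx) =>
        let k : Nat := aIdx.getD (nIdx.getD 0)
        PySem.List.insert steps (k : Int) pvFitStep

-- ===== PRECONDITION & SPEC =====
def Spec_inject_imported_asset_fit_step_py (task_name : String) (steps : List String) (out : List String) : Prop := out = inject_imported_asset_fit_step_py_alt task_name steps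
instance (task_name : String) (steps : List String) (out : List String) : Decidable (Spec_inject_imported_asset_fit_step_py task_name steps out) := by unfold Spec_inject_imported_asset_fit_step_py; infer_instance

-- ===== CLAIM (what is proved, stated in full; the proofs are below) =====
def Claim_equal_inject_imported_asset_fit_step_py : Prop := ∀ (task_name : String) (steps : List String), Dom_inject_imported_asset_fit_step_py task_name steps → Spec_inject_imported_asset_fit_step_py task_name steps (inject_imported_asset_fit_step_py task_name steps)

-- ===== LEMMAS AND PROOFS =====

theorem pvAltLoop_eq (rest : List String) : ∀ (i : Nat) (a n : Option Nat),
    pvAltLoop i rest a n =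
      if rest.any (fun s => pvAnyTerm pvFitTerms (PySem.Str.lower s)) then none
      else some (a.or (pvScanAsset i rest), n.or (pvScanAnim i rest)) := by
  induction rest with
  | nil => intro i a n; simp [pvAltLoop, pvScanAsset, pvScanAnim]
  | cons s rest ih =>
    intro i a n
    cases hf : pvAnyTerm pvFitTerms (PySem.Str.lower s) with
    | true => simp [pvAltLoop, hf]
    | false =>
      simp only [pvAltLoop, hf, Bool.false_eq_true, if_false, List.any_cons, Bool.false_or]
      rw [ih]
      by_cases hr : rest.any (fun s => pvAnyTerm pvFitTerms (PySem.Str.lower s)) = true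
      · simp [hr]
      · simp only [hr]
        have hA : pvScanAsset i (s :: rest)
            = if pvAnyTerm pvAssetTerms (PySem.Str.lower s) then some (i + 1)
              else pvScanAsset (i + 1) rest := rfl
        have hN : pvScanAnim i (s :: rest)
            = if pvAnyTerm pvAnimTerms (PySem.Str.lower s) then some i
              else pvScanAnim (i + 1) rest := rfl
        rw [hA, hN]
        cases a <;> cases n <;>
          cases h1 : pvAnyTerm pvAssetTerms (PySem.Str.lower s) <;>
          cases h2 : pvAnyTerm pvAnimTerms (PySem.Str.lower s) <;>
            simp [Option.or]

theorem pvScanAsset_le (rest : List String) : ∀ (i k : Nat),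
    pvScanAsset i rest = some k → k ≤ i + rest.length := by
  induction rest with
  | nil => intro i k h; simp [pvScanAsset] at h
  | cons s rest ih =>
    intro i k h
    simp only [pvScanAsset] at h
    split at h
    · injection h with h'
      simp only [List.length_cons]; omega
    · have := ih (i + 1) k h
      simp only [List.length_cons]; omega

theorem pvScanAnim_le (rest : List String) : ∀ (i k : Nat),
    pvScanAnim i rest = some k → k ≤ i + rest.length := by
  induction rest with
  | nil => intro i k h; simp [pvScanAnim] at h
  | cons s rest ih =>
    intro i k h
    simp only [pvScanAnim] at h
    split at h
    · injection h with h'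
      simp only [List.length_cons]; omega
    · have := ih (i + 1) k h
      simp only [List.length_cons]; omega

-- ===== VERDICT (by name: the statement is the Claim_ definition above) =====
theorem inject_imported_asset_fit_step_py_spec : Claim_equal_inject_imported_asset_fit_step_py := by
  intro task_name steps _
  unfold Spec_inject_imported_asset_fit_step_py
  unfold inject_imported_asset_fit_step_py inject_imported_asset_fit_step_py_alt
  by_cases he : steps = []
  · simp [he]
  · simp only [if_neg he]
    cases hc : pvAssetTerms.any (fun t => PySem.Str.isIn t
        (PySem.Str.lower (PySem.Str.join " " (task_name :: steps)))) with
    | false => simp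
    | true =>
      simp only [Bool.not_true, Bool.false_eq_true, if_false]
      rw [pvAltLoop_eq]
      cases hf : steps.any (fun s => pvAnyTerm pvFitTerms (PySem.Str.lower s)) with
      | true => simp
      | false =>
        simp only [Bool.false_eq_true, if_false, Option.none_or]
        cases hA : pvScanAsset 0 steps with
        | some j =>
          have hle : j ≤ steps.length := by
            have := pvScanAsset_le steps 0 j hA; omega
          simp only [Option.getD_some]
          rw [PySem.List.insert_natCast steps j pvFitStep hle]
          simp
        | none =>
          cases hN : pvScanAnim 0 steps with
          | some j =>
            have hle : j ≤ steps.length := by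
              have := pvScanAnim_le steps 0 j hN; omega
            simp only [Option.getD_some, Option.getD_none]
            rw [PySem.List.insert_natCast steps j pvFitStep hle]
            simp
          | none =>
            simp only [Option.getD_none]
            rw [PySem.List.insert_natCast steps 0 pvFitStep (by omega)]
            simp
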